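-- pv_equiv track=rewrite | github.com/ios-study-boost/codingtest | 이정인/0910.py | solution
-- ===== SOURCE A (Python) =====
-- def solution(phone_book):
--     answer = True
--     phone_book.sort()
--     slideIdx = len(phone_book[0])
--     dict  = {phone_book[0]:0}
--
--     for p in phone_book:
--         key = p[0:slideIdx]
--         if phone_book[0] == key:
--             dict[key]+=1
--             if dict[key] > 1:
--                 return False
--
--
--     return answer
-- ===== SOURCE B (Python) =====
-- def solution(phone_book):
--     # Equivalence is about the return value; like A, this sorts phone_book in place.
--     phone_book.sort()
--     if len(phone_book) > 1 and phone_book[1].startswith(phone_book[0]):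
--         return False
--     return True
-- ===== Notes on version B (the rewrite author's own statement) =====
-- stated objective: simpler
-- what changed: After sorting, B replaces A's full scan with a prefix dict counter by a single adjacency check: any string with the minimum as prefix sits right after it, so it only tests phone_book[1].startswith(phone_book[0]).
import Mathlib
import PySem

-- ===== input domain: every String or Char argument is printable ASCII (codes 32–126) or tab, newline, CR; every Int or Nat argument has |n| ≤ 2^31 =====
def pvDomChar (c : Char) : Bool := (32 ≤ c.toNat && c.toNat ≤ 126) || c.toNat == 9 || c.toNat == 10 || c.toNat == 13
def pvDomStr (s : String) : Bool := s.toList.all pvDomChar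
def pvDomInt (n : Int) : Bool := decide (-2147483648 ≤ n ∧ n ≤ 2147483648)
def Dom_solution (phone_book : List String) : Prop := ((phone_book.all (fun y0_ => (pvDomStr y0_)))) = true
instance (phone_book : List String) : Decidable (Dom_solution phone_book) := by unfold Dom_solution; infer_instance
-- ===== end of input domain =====

-- B replaces A's scan-with-a-dict-counter by a single adjacency check after the sort
-- (in Python both sort phone_book in place; the equivalence proved here is about the return value).

-- ===== PORT A =====
-- the for-loop of A: carries the dict; the early 'return False' ends the recursion
def solutionLoop (h0 : String) (slideIdx : Int) (d : PySem.Dict String Int) : List String → Bool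
  | [] => true
  | p :: rest =>
    let key := PySem.Str.slice p (some 0) (some slideIdx)
    if h0 == key then
      -- dict[key] += 1  (key = h0 is always in the dict here, so getD never takes its default)
      let d' := d.insert key (d.getD key 0 + 1)
      if d'.getD key 0 > 1 then false
      else solutionLoop h0 slideIdx d' rest
    else solutionLoop h0 slideIdx d rest

def solution (phone_book : List String) : Bool :=
  match PySem.List.sorted phone_book (fun x => x) false with
  | [] => true   -- Python raises IndexError at phone_book[0] here; excluded by Pre_
  | h0 :: t =>
      solutionLoop h0 (PySem.Str.len h0) (PySem.Dict.ofList [(h0, 0)]) (h0 :: t)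

-- ===== PORT B =====
def solution_alt (phone_book : List String) : Bool :=
  match PySem.List.sorted phone_book (fun x => x) false with
  | x :: y :: _ => if PySem.Str.startswith y x then false else true
  | _ => true

-- ===== PRECONDITION & SPEC =====
-- Pre_ excludes only the empty list, on which A raises IndexError at phone_book[0].
def Pre_solution (phone_book : List String) : Prop := phone_book ≠ []
instance (phone_book : List String) : Decidable (Pre_solution phone_book) := by unfold Pre_solution; infer_instance
def pvWitness_solution : List String := (["119", "97674223", "1195524421"])

def Spec_solution (phone_book : List String) (out : Bool) : Prop := out = solution_alt phone_book
instance (phone_book : List String) (out : Bool) : Decidable (Spec_solution phone_book out) := by unfold Spec_solution; infer_instance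

-- ===== CLAIM (what is proved, stated in full; the proofs are below) =====
def Claim_equal_solution : Prop := ∀ (phone_book : List String), Dom_solution phone_book → Pre_solution phone_book → Spec_solution phone_book (solution phone_book)

-- ===== LEMMAS AND PROOFS =====

-- p[0:len(x)] == x  iff  x is a prefix of p (as code-point lists)
theorem key_eq_iff (x p : String) :
    (x == PySem.Str.slice p (some 0) (some ((x.length : Int)))) = true ↔ x.toList <+: p.toList := by
  rw [beq_iff_eq]
  constructor
  · intro h
    rw [List.prefix_iff_eq_take]
    have := congrArg String.toList h
    simpa [PySem.Str.toList_slice, PySem.Chars.slice_eq_listSlice,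
      PySem.List.slice_to_natCast] using this
  · intro h
    apply String.toList_inj.mp
    have h2 := List.prefix_iff_eq_take.mp h
    simp [PySem.Str.toList_slice, PySem.Chars.slice_eq_listSlice,
      PySem.List.slice_to_natCast]
    simpa using h2

-- between on the lexicographic order: a < b < c and a a prefix of c ⇒ a a prefix of b
theorem lex_between : ∀ (a b c : List Char), List.Lex (· < ·) a b → List.Lex (· < ·) b c →
    a <+: c → a <+: b
  | [], _, _, _, _, _ => List.nil_prefix
  | x :: a', b, c, hab, hbc, h => by
    obtain ⟨c', rfl, hc⟩ : ∃ c', c = x :: c' ∧ a' <+: c' := by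
      rcases h with ⟨t, ht⟩
      cases c with
      | nil => simp at ht
      | cons hch tc =>
        injection ht with h1 h2
        exact ⟨tc, by rw [h1], ⟨t, h2⟩⟩
    cases hab with
    | rel hr =>
      cases hbc with
      | rel hr2 => exact absurd (lt_trans hr hr2) (lt_irrefl _)
      | cons h2 => exact absurd hr (lt_irrefl _)
    | cons h1 =>
      cases hbc with
      | rel hr2 => exact absurd hr2 (lt_irrefl _)
      | cons h2 => exact List.cons_prefix_cons.mpr ⟨rfl, lex_between _ _ _ h1 h2 hc⟩

theorem le_between (x y p : String) (hxy : x ≤ y) (hyp : y ≤ p)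
    (h : x.toList <+: p.toList) : x.toList <+: y.toList := by
  rcases lt_or_eq_of_le hxy with hlt | rfl
  · rcases lt_or_eq_of_le hyp with hlt2 | rfl
    · exact lex_between _ _ _ (String.lt_iff_toList_lt.mp hlt) (String.lt_iff_toList_lt.mp hlt2) h
    · exact h
  · exact List.prefix_refl _

-- the loop after its first iteration: the dict is {h0: 1}; false iff some element has h0 as a prefix
theorem loop_after_first (h0 : String) :
    ∀ (l : List String) (d : PySem.Dict String Int), d.getD h0 0 = 1 →
      solutionLoop h0 ((h0.length : Int)) d l
        = l.all (fun p => !(decide (h0.toList <+: p.toList))) := by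
  intro l
  induction l with
  | nil => intro d hd; simp [solutionLoop]
  | cons p rest ih =>
    intro d hd
    simp only [solutionLoop, List.all_cons]
    by_cases hk : (h0 == PySem.Str.slice p (some 0) (some ((h0.length : Int)))) = true
    · have hpre : h0.toList <+: p.toList := (key_eq_iff h0 p).mp hk
      have hkey : PySem.Str.slice p (some 0) (some ((h0.length : Int))) = h0 :=
        (beq_iff_eq.mp hk).symm
      rw [if_pos hk]
      simp only [hkey]
      rw [PySem.Dict.getD_insert]
      simp [hd, hpre]
    · rw [if_neg (by simpa using hk)]
      have hnp : ¬ (h0.toList <+: p.toList) := fun hc => hk ((key_eq_iff h0 p).mpr hc)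
      rw [ih d hd]
      simp [hnp]

-- the whole comparison, on any ≤-sorted nonempty list
theorem core (h0 : String) (t : List String) (hpw : (h0 :: t).Pairwise (fun a b => a ≤ b)) :
    solutionLoop h0 (PySem.Str.len h0) (PySem.Dict.ofList [(h0, 0)]) (h0 :: t)
      = (match h0 :: t with
         | x :: y :: _ => if PySem.Str.startswith y x then false else true
         | _ => true) := by
  have hlen : PySem.Str.len h0 = ((h0.length : Int)) := by simp [PySem.Str.len]
  have hself : (h0 == PySem.Str.slice h0 (some 0) (some ((h0.length : Int)))) = true :=
    (key_eq_iff h0 h0).mpr (List.prefix_refl _)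
  have hkey : PySem.Str.slice h0 (some 0) (some ((h0.length : Int))) = h0 :=
    (beq_iff_eq.mp hself).symm
  have hd0 : (PySem.Dict.ofList [(h0, (0:Int))]).getD h0 0 = 0 := by
    simp [PySem.Dict.ofList, PySem.Dict.update, PySem.Dict.getD,
      PySem.Dict.get?_insert_self, List.foldl]
  rw [hlen]
  -- the first iteration (p = h0): its key is h0 itself, the counter goes 0 → 1
  have hfirst : solutionLoop h0 ((h0.length : Int)) (PySem.Dict.ofList [(h0, 0)]) (h0 :: t)
      = solutionLoop h0 ((h0.length : Int)) ((PySem.Dict.ofList [(h0, 0)]).insert h0 1) t := by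
    simp [solutionLoop, hkey, hd0]
  rw [hfirst, loop_after_first h0 t _ (by rw [PySem.Dict.getD_insert]; simp)]
  cases t with
  | nil => simp
  | cons y t' =>
    have hxy : h0 ≤ y := (List.pairwise_cons.mp hpw).1 y List.mem_cons_self
    have hyt : ∀ p ∈ t', y ≤ p := (List.pairwise_cons.mp (List.pairwise_cons.mp hpw).2).1
    have hsw_eq : PySem.Chars.startswith y.toList h0.toList = decide (h0.toList <+: y.toList) := by
      by_cases hsw : h0.toList <+: y.toList
      · simp only [decide_eq_true hsw]
        exact (PySem.Chars.startswith_iff _ _).mpr hsw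
      · simp only [decide_eq_false hsw]
        exact Bool.eq_false_iff.mpr (fun hc => hsw ((PySem.Chars.startswith_iff _ _).mp hc))
    by_cases hsw : h0.toList <+: y.toList
    · simp [PySem.Str.startswith_eq, hsw_eq, hsw]
    · have hall : ∀ p ∈ t', ¬ (h0.toList <+: p.toList) := by
        intro p hp hc
        exact hsw (le_between h0 y p hxy (hyt p hp) hc)
      simp [PySem.Str.startswith_eq, hsw_eq, hsw]
      exact hall

-- ===== VERDICT (by name: the statement is the Claim_ definition above) =====
theorem solution_spec : Claim_equal_solution := by
  intro phone_book _ hpre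
  unfold Spec_solution solution solution_alt
  have hpw : (PySem.List.sorted phone_book (fun x => x) false).Pairwise (fun a b => a ≤ b) := by
    simpa using PySem.List.sorted_pairwise phone_book (fun x => x)
  cases hcase : PySem.List.sorted phone_book (fun x => x) false with
  | nil =>
    exact absurd (by simpa [PySem.List.sorted_eq_nil_iff] using hcase) hpre
  | cons h0 t =>
    rw [hcase] at hpw
    exact core h0 t hpw
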